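-- pv_equiv track=rewrite | github.com/gadgetlabs/LLMKnowledgeBases | scripts/ingest.py | _find_matching_article
-- ===== SOURCE A (Python) =====
-- def _find_matching_article(surname: str, year: str, wiki_stems: list[str]) -> str | None:
--     """Return the wiki article stem that best matches (surname, year), or None."""
--     if not surname or not year:
--         return None
--     candidates = [
--         s for s in wiki_stems
--         if surname in s.lower() and year in s
--     ]
--     if len(candidates) == 1:
--         return candidates[0]
--     if len(candidates) > 1:
--         # Prefer the one that starts with 'required-' or 'suggested-'
--         for prefix in ("required-", "suggested-"):
--             ranked = [c for c in candidates if c.startswith(prefix)]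
--             if ranked:
--                 return ranked[0]
--         return candidates[0]
--     return None
-- ===== SOURCE B (Python) =====
-- def _find_matching_article(surname: str, year: str, wiki_stems: list[str]) -> str | None:
--     """Single pass: keep the earliest stem with the lowest priority tier."""
--     if not surname or not year:
--         return None
--     best = None
--     best_p = 3
--     for s in wiki_stems:
--         if surname in s.lower() and year in s:
--             p = 0 if s.startswith("required-") else 1 if s.startswith("suggested-") else 2
--             if p < best_p:
--                 best, best_p = s, p
--     return best
-- ===== Notes on version B (the rewrite author's own statement) =====
-- stated objective: alternative
-- what changed: Replaces filter-into-candidates plus length casing and two prefix re-scans with one pass over wiki_stems that keeps the earliest matching stem of lowest priority tier (required- < suggested- < other).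
import Mathlib
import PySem

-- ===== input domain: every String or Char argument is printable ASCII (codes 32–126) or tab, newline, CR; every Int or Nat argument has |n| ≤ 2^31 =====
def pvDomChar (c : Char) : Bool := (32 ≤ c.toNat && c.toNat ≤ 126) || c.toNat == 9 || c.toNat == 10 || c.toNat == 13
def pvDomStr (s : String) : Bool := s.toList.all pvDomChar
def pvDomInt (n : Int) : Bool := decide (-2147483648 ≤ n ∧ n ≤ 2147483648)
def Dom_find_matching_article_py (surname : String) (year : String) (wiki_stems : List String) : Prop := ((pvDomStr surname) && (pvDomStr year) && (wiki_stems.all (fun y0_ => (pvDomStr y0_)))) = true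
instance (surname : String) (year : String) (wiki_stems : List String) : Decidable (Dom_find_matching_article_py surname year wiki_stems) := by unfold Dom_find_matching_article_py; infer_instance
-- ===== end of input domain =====

-- B replaces A's filter-then-rank (length casing plus two prefix re-scans) with one fold keeping the earliest lowest-tier match; alternative decomposition, same cost.


-- ===== PORT A =====
def find_matching_article_py (surname : String) (year : String) (wiki_stems : List String) : Option String :=
  if surname = "" ∨ year = "" then none
  else
    let candidates := wiki_stems.filter
      (fun s => PySem.Str.isIn surname (PySem.Str.lower s) && PySem.Str.isIn year s)
    if candidates.length = 1 then PySem.List.pyGet? candidates 0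
    else if 1 < candidates.length then
      -- the Python loop over ("required-", "suggested-"), unrolled
      match candidates.filter (fun c => PySem.Str.startswith c "required-") with
      | r :: _ => some r
      | [] =>
        match candidates.filter (fun c => PySem.Str.startswith c "suggested-") with
        | r :: _ => some r
        | [] => PySem.List.pyGet? candidates 0
    else none

-- ===== PORT B =====
-- B's loop body: update the running best when this stem matches with a strictly lower tier
def pvAltStep (surname : String) (year : String) (acc : Option String × Nat) (s : String) : Option String × Nat :=
  if PySem.Str.isIn surname (PySem.Str.lower s) && PySem.Str.isIn year s then
    let p : Nat := if PySem.Str.startswith s "required-" then 0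
                   else if PySem.Str.startswith s "suggested-" then 1 else 2
    if p < acc.2 then (some s, p) else acc
  else acc

def find_matching_article_py_alt (surname : String) (year : String) (wiki_stems : List String) : Option String :=
  if surname = "" ∨ year = "" then none
  else (wiki_stems.foldl (pvAltStep surname year) (none, 3)).1

-- ===== PRECONDITION & SPEC =====
def Spec_find_matching_article_py (surname : String) (year : String) (wiki_stems : List String) (out : Option String) : Prop := out = find_matching_article_py_alt surname year wiki_stems
instance (surname : String) (year : String) (wiki_stems : List String) (out : Option String) : Decidable (Spec_find_matching_article_py surname year wiki_stems out) := by unfold Spec_find_matching_article_py; infer_instance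

-- ===== CLAIM (what is proved, stated in full; the proofs are below) =====
def Claim_equal_find_matching_article_py : Prop := ∀ (surname : String) (year : String) (wiki_stems : List String), Dom_find_matching_article_py surname year wiki_stems → Spec_find_matching_article_py surname year wiki_stems (find_matching_article_py surname year wiki_stems)

-- ===== LEMMAS AND PROOFS =====

-- named forms of the two ports' predicates (definitionally equal to the inlined lambdas; kept
-- opaque to simp so hypotheses about them survive the pysem bridge rewriting)
def pvMatches (surname year : String) (s : String) : Bool :=
  PySem.Str.isIn surname (PySem.Str.lower s) && PySem.Str.isIn year s
def pvReq (s : String) : Bool := PySem.Str.startswith s "required-"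
def pvSugg (s : String) : Bool := PySem.Str.startswith s "suggested-"
def pvPrio (s : String) : Nat := if pvReq s then 0 else if pvSugg s then 1 else 2

lemma pvAltStep_eq (surname year : String) :
    pvAltStep surname year = fun acc s =>
      if pvMatches surname year s then
        (if pvPrio s < acc.2 then (some s, pvPrio s) else acc)
      else acc := rfl

-- unmatched stems leave B's accumulator unchanged: the fold over wiki_stems equals the fold over A's candidates
lemma pvFold_filter (m : String → Bool) (xs : List String) (acc : Option String × Nat) :
    xs.foldl (fun acc s => if m s then (if pvPrio s < acc.2 then (some s, pvPrio s) else acc) else acc) acc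
      = (xs.filter m).foldl (fun acc s => if m s then (if pvPrio s < acc.2 then (some s, pvPrio s) else acc) else acc) acc := by
  induction xs generalizing acc with
  | nil => rfl
  | cons c cs ih =>
      by_cases h : m c = true
      · simp only [List.foldl_cons, List.filter_cons, h, if_pos]
        exact ih _
      · simp only [List.foldl_cons, List.filter_cons, h, Bool.false_eq_true, ite_false]
        exact ih acc

lemma pvFold0 (m : String → Bool) (cs : List String) (b : String) :
    cs.foldl (fun acc s => if m s then (if pvPrio s < acc.2 then (some s, pvPrio s) else acc) else acc) (some b, 0) = (some b, 0) := by
  induction cs with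
  | nil => rfl
  | cons c cs ih =>
      rw [List.foldl_cons]
      by_cases h : m c = true
      · rw [if_pos h, if_neg (by omega)]; exact ih
      · rw [if_neg (by simp [h])]; exact ih

lemma pvFold1 (m : String → Bool) (cs : List String) (b : String)
    (hcs : ∀ c ∈ cs, m c = true) :
    cs.foldl (fun acc s => if m s then (if pvPrio s < acc.2 then (some s, pvPrio s) else acc) else acc) (some b, 1)
      = match cs.find? pvReq with
        | some r => (some r, 0)
        | none => (some b, 1) := by
  induction cs generalizing b with
  | nil => rfl
  | cons c cs ih =>
      rw [List.foldl_cons, if_pos (hcs c (by simp)), List.find?_cons]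
      by_cases hr : pvReq c = true
      · rw [show pvPrio c = 0 by simp [pvPrio, hr], if_pos (by omega), pvFold0]
        simp [hr]
      · rw [if_neg (by simp [pvPrio, hr]; split <;> omega)]
        rw [ih b (fun c hc => hcs c (by simp [hc]))]
        simp [hr]

lemma pvFold2 (m : String → Bool) (cs : List String) (b : String)
    (hcs : ∀ c ∈ cs, m c = true) :
    cs.foldl (fun acc s => if m s then (if pvPrio s < acc.2 then (some s, pvPrio s) else acc) else acc) (some b, 2)
      = match cs.find? pvReq with
        | some r => (some r, 0)
        | none =>
          match cs.find? pvSugg with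
          | some r => (some r, 1)
          | none => (some b, 2) := by
  induction cs generalizing b with
  | nil => rfl
  | cons c cs ih =>
      rw [List.foldl_cons, if_pos (hcs c (by simp)), List.find?_cons, List.find?_cons]
      by_cases hr : pvReq c = true
      · rw [show pvPrio c = 0 by simp [pvPrio, hr], if_pos (by omega), pvFold0]
        simp [hr]
      · by_cases hs : pvSugg c = true
        · rw [show pvPrio c = 1 by simp [pvPrio, hr, hs], if_pos (by omega)]
          rw [pvFold1 m _ _ (fun c hc => hcs c (by simp [hc]))]
          simp [hr, hs]
        · rw [if_neg (by simp [pvPrio, hr, hs])]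
          rw [ih b (fun c hc => hcs c (by simp [hc]))]
          simp [hr, hs]

-- B's fold over the candidate list computes: first required-, else first suggested-, else the head
lemma pvFoldStart (m : String → Bool) (cs : List String)
    (hcs : ∀ c ∈ cs, m c = true) :
    (cs.foldl (fun acc s => if m s then (if pvPrio s < acc.2 then (some s, pvPrio s) else acc) else acc) (none, 3)).1
      = match cs.find? pvReq with
        | some r => some r
        | none =>
          match cs.find? pvSugg with
          | some r => some r
          | none => cs.head? := by
  cases cs with
  | nil => rfl
  | cons c cs =>
      rw [List.foldl_cons, if_pos (hcs c (by simp)),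
          if_pos (by simp only [pvPrio]; split <;> [omega; (split <;> omega)]),
          List.find?_cons, List.find?_cons]
      by_cases hr : pvReq c = true
      · rw [show pvPrio c = 0 by simp [pvPrio, hr], pvFold0]
        simp [hr]
      · by_cases hs : pvSugg c = true
        · rw [show pvPrio c = 1 by simp [pvPrio, hr, hs],
              pvFold1 m _ _ (fun c hc => hcs c (by simp [hc]))]
          simp only [hr, hs]
          cases List.find? pvReq cs <;> simp
        · rw [show pvPrio c = 2 by simp [pvPrio, hr, hs],
              pvFold2 m _ _ (fun c hc => hcs c (by simp [hc]))]
          simp only [hr, hs]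
          cases cs.find? pvReq <;> cases cs.find? pvSugg <;> simp

lemma pvHead?_filter {α : Type} (p : α → Bool) (xs : List α) :
    (xs.filter p).head? = xs.find? p := by
  induction xs with
  | nil => rfl
  | cons c cs ih => by_cases h : p c <;> simp [h, ih]

lemma pvGet0 (c : String) (cs : List String) :
    PySem.List.pyGet? (c :: cs) 0 = some c := by
  simp [PySem.List.pyGet?, PySem.List.pyIdx?]

-- ===== VERDICT (by name: the statement is the Claim_ definition above) =====
theorem find_matching_article_py_spec : Claim_equal_find_matching_article_py := by
  intro surname year wiki_stems _
  unfold Spec_find_matching_article_py find_matching_article_py find_matching_article_py_alt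
  by_cases hg : surname = "" ∨ year = ""
  · rw [if_pos hg, if_pos hg]
  · rw [if_neg hg, if_neg hg, pvAltStep_eq,
        show (fun s => PySem.Str.isIn surname (PySem.Str.lower s) && PySem.Str.isIn year s)
           = pvMatches surname year from rfl,
        show (fun c => PySem.Str.startswith c "required-") = pvReq from rfl,
        show (fun c => PySem.Str.startswith c "suggested-") = pvSugg from rfl,
        pvFold_filter]
    have hcs : ∀ c ∈ wiki_stems.filter (pvMatches surname year), pvMatches surname year c = true :=
      fun c hc => List.of_mem_filter hc
    rw [pvFoldStart _ _ hcs]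
    match hm : wiki_stems.filter (pvMatches surname year) with
    | [] => rfl
    | [c] =>
        rw [if_pos (by simp), pvGet0, List.find?_cons, List.find?_cons]
        by_cases hr : pvReq c = true
        · simp [hr]
        · by_cases hs : pvSugg c = true <;> simp [hr, hs]
    | c :: d :: rest =>
        rw [if_neg (by simp), if_pos (by simp), ← pvHead?_filter, ← pvHead?_filter]
        cases hfr : ((c :: d :: rest).filter pvReq) with
        | cons r t => simp
        | nil =>
          cases hfs : ((c :: d :: rest).filter pvSugg) with
          | cons r t => simp
          | nil => simp
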